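-- pv_equiv track=rewrite | github.com/newLLing/Table2LaTeX-RL | examples/train/grpo/plugin/plugin.py | grid2html
-- ===== SOURCE A (Python) =====
-- from typing import List, Tuple, Optional
--
-- def grid2html(grid: List[List[str]]) -> str:
--     """将grid转换为HTML表格"""
--     def to_td(grid, r, c):
--         if grid[r][c] in ('<<', '^^', '..'):
--             return ''
--         td = {'text': grid[r][c], 'rowspan': 1, 'colspan': 1}
--
--         for i in range(r + 1, len(grid)):
--             if grid[i][c] == '^^':
--                 td['rowspan'] += 1
--             else:
--                 break
--
--         for j in range(c + 1, len(grid[r])):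
--             if grid[r][j] == '<<':
--                 td['colspan'] += 1
--             else:
--                 break
--
--         rowspan_str = f'rowspan={td["rowspan"]}' if td['rowspan'] > 1 else ''
--         colspan_str = f'colspan={td["colspan"]}' if td['colspan'] > 1 else ''
--         attrs = ' '.join(filter(None, [rowspan_str, colspan_str]))
--         return f'<td {attrs}> {td["text"]} </td>'.strip()
--
--     html = []
--     for r in range(len(grid)):
--         row = []
--         for c in range(len(grid[0])):
--             td_html = to_td(grid, r, c)
--             if td_html:
--                 row.append(td_html)
--         html.append(f'<tr> {"".join(row)} </tr>')
--
--     return '<html><body><table>' + '\n'.join(html) + '</table></body></html>'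
-- ===== SOURCE B (Python) =====
-- def grid2html(grid):
--     """Convert grid to an HTML table, precomputing span tables in one reverse pass."""
--     n = len(grid)
--     if n == 0:
--         return '<html><body><table></table></body></html>'
--     m = len(grid[0])
--
--     # down[r][c] = number of consecutive '^^' markers directly below (r, c), for c < m
--     down = [[0] * m for _ in range(n)]
--     for r in range(n - 2, -1, -1):
--         for c in range(m):
--             if grid[r + 1][c] == '^^':
--                 down[r][c] = down[r + 1][c] + 1
--
--     # right[r][c] = number of consecutive '<<' markers directly right of (r, c), per-row length
--     right = []
--     for row in grid:
--         L = len(row)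
--         rr = [0] * L
--         for c in range(L - 2, -1, -1):
--             if row[c + 1] == '<<':
--                 rr[c] = rr[c + 1] + 1
--         right.append(rr)
--
--     html = []
--     for r in range(n):
--         row, drow, rrow = grid[r], down[r], right[r]
--         cells = []
--         for c in range(m):
--             v = row[c]
--             if v in ('<<', '^^', '..'):
--                 continue
--             rowspan = 1 + drow[c]
--             colspan = 1 + rrow[c]
--             rowspan_str = f'rowspan={rowspan}' if rowspan > 1 else ''
--             colspan_str = f'colspan={colspan}' if colspan > 1 else ''
--             attrs = ' '.join(filter(None, [rowspan_str, colspan_str]))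
--             cells.append(f'<td {attrs}> {v} </td>'.strip())
--         html.append(f'<tr> {"".join(cells)} </tr>')
--     return '<html><body><table>' + '\n'.join(html) + '</table></body></html>'
-- ===== Notes on version B (the rewrite author's own statement) =====
-- stated objective: alternative
-- what changed: B precomputes the rowspan ('down') and colspan ('right') tables in one reverse pass and reads spans per cell, instead of A's per-cell forward rescans below and to the right; output formatting is identical.
-- outside the precondition, e.g. on grid2html([['a', 'b'], ['c']]): A raises IndexError, B raises IndexError
import Mathlib
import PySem

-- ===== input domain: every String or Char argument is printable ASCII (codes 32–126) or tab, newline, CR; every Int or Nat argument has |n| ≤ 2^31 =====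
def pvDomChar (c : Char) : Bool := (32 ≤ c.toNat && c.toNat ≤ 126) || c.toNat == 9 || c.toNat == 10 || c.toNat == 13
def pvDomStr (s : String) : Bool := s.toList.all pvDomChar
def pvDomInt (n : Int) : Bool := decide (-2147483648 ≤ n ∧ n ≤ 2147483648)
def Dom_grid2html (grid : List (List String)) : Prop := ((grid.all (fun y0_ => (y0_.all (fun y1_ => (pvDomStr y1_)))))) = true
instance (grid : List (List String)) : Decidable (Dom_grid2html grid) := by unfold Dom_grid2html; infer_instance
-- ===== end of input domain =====

-- B precomputes both span tables in a single reverse pass instead of rescanning below/right of every cell (objective: alternative decomposition).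
-- ===== PORT A =====
-- `for i in range(r+1, len(grid)): if grid[i][c]=='^^': rowspan += 1 else: break` over the suffix below row r
def pvScanDown (c : Nat) : List (List String) → Nat
  | [] => 0
  | row :: rest => if row.getD c "" == "^^" then 1 + pvScanDown c rest else 0

-- `for j in range(c+1, len(grid[r])): if grid[r][j]=='<<': colspan += 1 else: break` over the suffix right of column c
def pvScanRight : List String → Nat
  | [] => 0
  | v :: rest => if v == "<<" then 1 + pvScanRight rest else 0

def pvToTd (grid : List (List String)) (r c : Nat) : String :=
  let v := (grid.getD r []).getD c ""   -- grid[r][c]; Pre_ keeps the index in range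
  if v == "<<" || v == "^^" || v == ".." then ""
  else
    let rowspan : Nat := 1 + pvScanDown c (grid.drop (r + 1))
    let colspan : Nat := 1 + pvScanRight ((grid.getD r []).drop (c + 1))
    let rowspanStr := if rowspan > 1 then "rowspan=" ++ toString rowspan else ""
    let colspanStr := if colspan > 1 then "colspan=" ++ toString colspan else ""
    let attrs := String.intercalate " " (([rowspanStr, colspanStr]).filter (· ≠ ""))
    PySem.Str.strip ("<td " ++ attrs ++ "> " ++ v ++ " </td>")

def grid2html (grid : List (List String)) : String :=
  let m := (grid.headD []).length   -- len(grid[0]); only reached when the row loop runs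
  let html := (List.range grid.length).map (fun r =>
    let row := ((List.range m).map (fun c => pvToTd grid r c)).filter (· ≠ "")
    "<tr> " ++ String.join row ++ " </tr>")
  "<html><body><table>" ++ String.intercalate "\n" html ++ "</table></body></html>"

-- ===== PORT B =====
-- down[r][c] = consecutive '^^' directly below (r,c), built bottom-up
def pvDownTable (m : Nat) : List (List String) → List (List Nat)
  | [] => []
  | _ :: rest =>
    let tail := pvDownTable m rest
    (match rest with
     | [] => List.replicate m 0
     | nextRow :: _ =>
        (List.range m).map (fun c =>
          if nextRow.getD c "" == "^^" then 1 + (tail.getD 0 []).getD c 0 else 0)) :: tail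

-- right[c] = consecutive '<<' directly right of column c, built right-to-left
def pvRightRow : List String → List Nat
  | [] => []
  | _ :: rest =>
    let tail := pvRightRow rest
    (match rest with
     | [] => 0
     | v :: _ => if v == "<<" then 1 + tail.getD 0 0 else 0) :: tail

def grid2html_alt (grid : List (List String)) : String :=
  match grid with
  | [] => "<html><body><table></table></body></html>"
  | first :: _ =>
    let m := first.length
    let down := pvDownTable m grid
    let right := grid.map pvRightRow
    let html := (List.range grid.length).map (fun r =>
      let row := grid.getD r []
      let drow := down.getD r []
      let rrow := right.getD r []
      let cells := ((List.range m).map (fun c =>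
        let v := row.getD c ""
        if v == "<<" || v == "^^" || v == ".." then ""
        else
          let rowspan : Nat := 1 + drow.getD c 0
          let colspan : Nat := 1 + rrow.getD c 0
          let rowspanStr := if rowspan > 1 then "rowspan=" ++ toString rowspan else ""
          let colspanStr := if colspan > 1 then "colspan=" ++ toString colspan else ""
          let attrs := String.intercalate " " (([rowspanStr, colspanStr]).filter (· ≠ ""))
          PySem.Str.strip ("<td " ++ attrs ++ "> " ++ v ++ " </td>"))).filter (· ≠ "")
      "<tr> " ++ String.join cells ++ " </tr>")
    "<html><body><table>" ++ String.intercalate "\n" html ++ "</table></body></html>"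

-- ===== PRECONDITION & SPEC =====
-- A raises IndexError exactly when some row is shorter than row 0 (the main loop indexes every
-- row up to len(grid[0])); Pre_ excludes exactly those inputs.
def Pre_grid2html (grid : List (List String)) : Prop :=
  ∀ row ∈ grid, (grid.headD []).length ≤ row.length
instance (grid : List (List String)) : Decidable (Pre_grid2html grid) := by unfold Pre_grid2html; infer_instance
def pvWitness_grid2html : List (List String) := [["a", "<<", "b"], ["^^", "..", "c"]]
def Spec_grid2html (grid : List (List String)) (out : String) : Prop := out = grid2html_alt grid
instance (grid : List (List String)) (out : String) : Decidable (Spec_grid2html grid out) := by unfold Spec_grid2html; infer_instance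

-- ===== CLAIM (what is proved, stated in full; the proofs are below) =====
def Claim_equal_grid2html : Prop := ∀ (grid : List (List String)), Dom_grid2html grid → Pre_grid2html grid → Spec_grid2html grid (grid2html grid)

-- ===== LEMMAS AND PROOFS =====
theorem getD_map_range {A : Type} (f : Nat → A) (d : A) {c m : Nat} (hc : c < m) :
    ((List.range m).map f).getD c d = f c := by
  simp [List.getD, hc]

theorem pvDownTable_cons_cons (m : Nat) (g nr : List String) (rest' : List (List String)) :
    pvDownTable m (g :: nr :: rest') =
      ((List.range m).map (fun c =>
        if nr.getD c "" == "^^" then 1 + ((pvDownTable m (nr :: rest')).getD 0 []).getD c 0 else 0))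
        :: pvDownTable m (nr :: rest') := rfl

theorem pvRightRow_cons_cons (v w : String) (rest' : List String) :
    pvRightRow (v :: w :: rest') =
      (if w == "<<" then 1 + (pvRightRow (w :: rest')).getD 0 0 else 0) :: pvRightRow (w :: rest') := rfl

theorem pvDownTable_getD (m : Nat) (grid : List (List String)) (r c : Nat) (hc : c < m) :
    ((pvDownTable m grid).getD r []).getD c 0 = pvScanDown c (grid.drop (r + 1)) := by
  induction grid generalizing r with
  | nil => simp [pvDownTable, pvScanDown]
  | cons g rest ih =>
    cases rest with
    | nil =>
      cases r with
      | zero => simp [pvDownTable, pvScanDown, List.getD, hc]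
      | succ r => simp [pvDownTable, pvScanDown, List.getD]
    | cons nr rest' =>
      cases r with
      | zero =>
        have h0 := ih 0
        simp only [List.drop_succ_cons, List.drop_zero] at h0
        rw [pvDownTable_cons_cons, List.getD_cons_zero, getD_map_range _ _ hc, h0,
          List.drop_succ_cons, List.drop_zero]
        simp [pvScanDown]
      | succ r =>
        rw [pvDownTable_cons_cons, List.getD_cons_succ, ih r]
        simp [List.drop_succ_cons]

theorem pvRightRow_getD (row : List String) (c : Nat) :
    (pvRightRow row).getD c 0 = pvScanRight (row.drop (c + 1)) := by
  induction row generalizing c with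
  | nil => simp [pvRightRow, pvScanRight]
  | cons v rest ih =>
    cases rest with
    | nil =>
      cases c with
      | zero => simp [pvRightRow, pvScanRight]
      | succ c => simp [pvRightRow, pvScanRight, List.getD]
    | cons w rest' =>
      cases c with
      | zero =>
        have h0 := ih 0
        simp only [List.drop_succ_cons, List.drop_zero] at h0
        rw [pvRightRow_cons_cons, List.getD_cons_zero, h0, List.drop_succ_cons, List.drop_zero]
        simp [pvScanRight]
      | succ c =>
        rw [pvRightRow_cons_cons, List.getD_cons_succ, ih c]
        simp [List.drop_succ_cons]

theorem grid2html_eq (grid : List (List String)) : grid2html grid = grid2html_alt grid := by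
  cases grid with
  | nil => rfl
  | cons first rest =>
    simp only [grid2html, grid2html_alt, List.headD_cons, List.length_cons]
    refine congrArg (fun l => "<html><body><table>" ++ String.intercalate "\n" l ++ "</table></body></html>") ?_
    apply List.map_congr_left
    intro r hr
    have hrlt : r < (first :: rest).length := by
      simpa using List.mem_range.mp hr
    refine congrArg (fun l => "<tr> " ++ String.join l ++ " </tr>") (congrArg (List.filter (· ≠ "")) ?_)
    apply List.map_congr_left
    intro c hc
    have hclt : c < first.length := List.mem_range.mp hc
    have hmap : ((first :: rest).map pvRightRow).getD r [] = pvRightRow ((first :: rest).getD r []) := by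
      simp only [List.getD_eq_getElem?_getD, List.getElem?_map,
        List.getElem?_eq_getElem hrlt, Option.map_some, Option.getD_some]
    simp only [pvToTd, hmap, pvDownTable_getD _ _ _ _ hclt, pvRightRow_getD]

-- ===== VERDICT (by name: the statement is the Claim_ definition above) =====
theorem grid2html_spec : Claim_equal_grid2html := by
  intro grid _ _
  unfold Spec_grid2html
  exact grid2html_eq grid
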